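-- pv_equiv track=rewrite | github.com/minarefaat1002/leetcode-solutions | 2457-minimum-addition-to-make-integer-beautiful/2457-minimum-addition-to-make-integer-beautiful.py | makeIntegerBeautiful
-- ===== SOURCE A (Python) =====
-- def makeIntegerBeautiful(n: int, target: int) -> int:
--     def sumOfDigits(num):
--         Sum = 0
--         while num:
--             Sum += num%10
--             num = num//10
--         return Sum
--     addedNumber = 0
--     temp = 10
--     i=0
--     while sumOfDigits(n) > target:
--         addedNumber =  (10-n%10)*(temp**i) + addedNumber
--         n = n//10 + 1
--         i+=1
--     return addedNumber
-- ===== SOURCE B (Python) =====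
-- def makeIntegerBeautiful(n: int, target: int) -> int:
--     def digitsum(m, acc=0):
--         return acc if m == 0 else digitsum(m // 10, acc + m % 10)
--     p = 1
--     while digitsum(-(-n // p)) > target:
--         p *= 10
--     return -(-n // p) * p - n
-- ===== Notes on version B (the rewrite author's own statement) =====
-- stated objective: alternative
-- what changed: B never mutates n or accumulates correction terms: it searches for the smallest power of ten p such that the digit sum of n rounded up to a multiple of p (computed as -(-n//p)*p) meets the target, and returns that single rounded value minus n; the digit sum is a tail recursion instead of A's while loop. Pre_ excludes only inputs where A diverges (negative n, or positive n with target < 1).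
import Mathlib
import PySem

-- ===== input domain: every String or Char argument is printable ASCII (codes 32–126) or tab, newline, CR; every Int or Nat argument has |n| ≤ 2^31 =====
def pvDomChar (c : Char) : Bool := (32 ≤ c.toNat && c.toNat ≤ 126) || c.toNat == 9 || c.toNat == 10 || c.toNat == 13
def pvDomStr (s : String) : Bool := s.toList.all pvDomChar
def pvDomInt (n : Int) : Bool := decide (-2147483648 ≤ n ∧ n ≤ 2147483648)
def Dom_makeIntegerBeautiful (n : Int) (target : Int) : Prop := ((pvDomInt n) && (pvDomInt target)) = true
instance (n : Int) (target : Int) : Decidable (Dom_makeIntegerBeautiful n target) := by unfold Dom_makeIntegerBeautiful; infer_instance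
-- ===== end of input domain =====

-- B searches for the smallest power of ten p whose round-up -(-n//p)*p has digit sum ≤ target
-- and returns that rounded value minus n, instead of A's loop mutating n and accumulating
-- per-step correction terms (objective: alternative); ports agree on all of Pre_.

-- ===== PORT A =====
-- A's inner helper: 'Sum = 0; while num: Sum += num%10; num //= 10'.
-- The 'num ≤ 0' guard only makes the recursion total: at 0 it returns 0 exactly as Python;
-- for negative num Python diverges (such inputs are outside Pre_).
def pvSumOfDigits (num : Int) : Int :=
  if num ≤ 0 then 0
  else PySem.Int.mod num 10 + pvSumOfDigits (PySem.Int.floordiv num 10)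
termination_by num.toNat
decreasing_by
  rw [PySem.Int.floordiv_eq_ediv_of_pos (by norm_num : (0:Int) < 10)]
  omega

-- A's while loop over state (n, addedNumber, temp, i); fuel only makes it total
-- (inside Pre_ the loop performs at most n.toNat iterations).
def pvLoopA (target : Int) : Nat → Int → Int → Int → Nat → Int
  | 0, _n, addedNumber, _temp, _i => addedNumber
  | fuel+1, n, addedNumber, temp, i =>
    if pvSumOfDigits n > target then
      pvLoopA target fuel (PySem.Int.floordiv n 10 + 1)
        ((10 - PySem.Int.mod n 10) * temp ^ i + addedNumber) temp (i + 1)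
    else addedNumber

def makeIntegerBeautiful (n : Int) (target : Int) : Int :=
  pvLoopA target (n.toNat + 1) n 0 10 0

-- ===== PORT B =====
-- B's digitsum(m, acc): 'return acc if m == 0 else digitsum(m // 10, acc + m % 10)'.
-- The 'm ≤ 0' guard only makes the recursion total: at 0 it returns acc exactly as Python;
-- for negative m Python's recursion diverges (such inputs are outside Pre_).
def pvDigitsumB (m : Int) (acc : Int) : Int :=
  if m ≤ 0 then acc
  else pvDigitsumB (PySem.Int.floordiv m 10) (acc + PySem.Int.mod m 10)
termination_by m.toNat
decreasing_by
  rw [PySem.Int.floordiv_eq_ediv_of_pos (by norm_num : (0:Int) < 10)]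
  omega

-- B's while loop over the power p; '-(-n // p)' is Python's round-up division;
-- fuel only makes it total (inside Pre_ the loop performs at most n.toNat + 1 iterations).
def pvLoopB (n target : Int) : Nat → Int → Int
  | 0, p => -(PySem.Int.floordiv (-n) p) * p - n
  | fuel+1, p =>
    if pvDigitsumB (-(PySem.Int.floordiv (-n) p)) 0 > target then
      pvLoopB n target fuel (p * 10)
    else -(PySem.Int.floordiv (-n) p) * p - n

def makeIntegerBeautiful_alt (n : Int) (target : Int) : Int :=
  pvLoopB n target (n.toNat + 2) 1

-- ===== PRECONDITION & SPEC =====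
-- Pre_ is exactly the set of inputs on which Python A terminates: for n < 0 the digit-sum
-- helper loops forever, and for n > 0 with target < 1 the rounding loop never ends.
def Pre_makeIntegerBeautiful (n : Int) (target : Int) : Prop :=
  (0 < n ∧ 1 ≤ target) ∨ (n = 0 ∧ 0 ≤ target)
instance (n : Int) (target : Int) : Decidable (Pre_makeIntegerBeautiful n target) := by unfold Pre_makeIntegerBeautiful; infer_instance

def pvWitness_makeIntegerBeautiful : Int × Int := (467, 6)

def Spec_makeIntegerBeautiful (n : Int) (target : Int) (out : Int) : Prop := out = makeIntegerBeautiful_alt n target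
instance (n : Int) (target : Int) (out : Int) : Decidable (Spec_makeIntegerBeautiful n target out) := by unfold Spec_makeIntegerBeautiful; infer_instance

-- ===== CLAIM (what is proved, stated in full; the proofs are below) =====
def Claim_equal_makeIntegerBeautiful : Prop := ∀ (n : Int) (target : Int), Dom_makeIntegerBeautiful n target → Pre_makeIntegerBeautiful n target → Spec_makeIntegerBeautiful n target (makeIntegerBeautiful n target)

-- ===== LEMMAS AND PROOFS =====

-- Abbreviation used throughout: S = pvSumOfDigits, in ediv/emod form.
theorem pvS_unfold (m : Int) :
    pvSumOfDigits m = if m ≤ 0 then 0 else m % 10 + pvSumOfDigits (m / 10) := by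
  rw [pvSumOfDigits]
  by_cases h : m ≤ 0
  · simp [h]
  · rw [if_neg h, if_neg h,
      PySem.Int.floordiv_eq_ediv_of_pos (by norm_num : (0:Int) < 10),
      PySem.Int.mod_eq_emod_of_pos (by norm_num : (0:Int) < 10)]

-- The two digit-sum helpers agree (B's carries an accumulator).
theorem pv_dsum_eq (m : Int) : ∀ acc, pvDigitsumB m acc = acc + pvSumOfDigits m := by
  fun_induction pvSumOfDigits m with
  | case1 m h => intro acc; rw [pvDigitsumB]; simp [h]
  | case2 m h ih => intro acc; rw [pvDigitsumB]; simp only [if_neg h]; rw [ih]; ring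

-- digit-sum facts
theorem pvS_zero : pvSumOfDigits 0 = 0 := by
  rw [pvS_unfold]; norm_num

theorem pvS_ten_mul (q : Int) (hq : 0 ≤ q) : pvSumOfDigits (10 * q) = pvSumOfDigits q := by
  rcases eq_or_lt_of_le hq with h | h
  · rw [← h]; norm_num
  · rw [pvS_unfold (10 * q), if_neg (by omega)]
    have h1 : 10 * q % 10 = 0 := by omega
    have h2 : 10 * q / 10 = q := by omega
    rw [h1, h2]; ring

theorem pvS_succ (q : Int) (hq : 0 ≤ q) (hr : q % 10 ≠ 9) :
    pvSumOfDigits (q + 1) = pvSumOfDigits q + 1 := by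
  rw [pvS_unfold (q + 1), if_neg (by omega), pvS_unfold q]
  by_cases h0 : q ≤ 0
  · have : q = 0 := le_antisymm h0 hq
    subst this
    norm_num [pvS_zero]
  · rw [if_neg h0]
    have h1 : (q + 1) % 10 = q % 10 + 1 := by omega
    have h2 : (q + 1) / 10 = q / 10 := by omega
    rw [h1, h2]; ring

theorem pvS_one : pvSumOfDigits 1 = 1 := by
  rw [pvS_unfold, if_neg (by norm_num)]
  norm_num [pvS_zero]

-- ===== A's loop telescopes to the scaled rounding recursion rA =====

-- proof-side: A's final rounded value, scaled back to n's magnitude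
def pvRA (target : Int) : Nat → Int → Int
  | 0, m => m
  | fuel+1, m => if pvSumOfDigits m ≤ target then m else 10 * pvRA target fuel (m / 10 + 1)

theorem pv_loopA_eq (target : Int) (fuel : Nat) :
    ∀ (m acc : Int) (i : Nat),
      pvLoopA target fuel m acc 10 i = acc + 10 ^ i * pvRA target fuel m - m * 10 ^ i := by
  induction fuel with
  | zero => intro m acc i; simp [pvLoopA, pvRA]; ring
  | succ fuel ih =>
      intro m acc i
      rw [pvLoopA, pvRA]
      by_cases h : pvSumOfDigits m > target
      · rw [if_pos h, if_neg (by omega : ¬ pvSumOfDigits m ≤ target)]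
        rw [PySem.Int.floordiv_eq_ediv_of_pos (by norm_num : (0:Int) < 10),
            PySem.Int.mod_eq_emod_of_pos (by norm_num : (0:Int) < 10)]
        rw [ih]
        have hm : 10 * (m / 10) + m % 10 = m := Int.mul_ediv_add_emod m 10
        rw [pow_succ]
        linear_combination (-(10:Int) ^ i) * hm
      · rw [if_neg h, if_pos (by omega : pvSumOfDigits m ≤ target)]
        ring

-- ===== B's loop telescopes to the ceiling rounding recursion rB =====

-- proof-side: B's final rounded value at scale p, divided by p
def pvRB (target : Int) : Nat → Int → Int
  | 0, c => c
  | fuel+1, c => if pvSumOfDigits c ≤ target then c else 10 * pvRB target fuel ((c + 9) / 10)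

-- ceiling division composes: ⌈n/(10p)⌉ = ⌈⌈n/p⌉/10⌉
theorem pv_ceil_comp (n p : Int) (_hn : 0 ≤ n) (hp : 0 < p) :
    -(PySem.Int.floordiv (-n) (p * 10)) = (-(PySem.Int.floordiv (-n) p) + 9) / 10 := by
  rw [PySem.Int.floordiv_eq_ediv_of_pos hp,
      PySem.Int.floordiv_eq_ediv_of_pos (by positivity : (0:Int) < p * 10)]
  have : (-n) / (p * 10) = ((-n) / p) / 10 := (Int.ediv_ediv_of_nonneg (by omega : (0:Int) ≤ p)).symm
  rw [this]
  omega

theorem pv_loopB_eq (n target : Int) (hn : 0 ≤ n) (fuel : Nat) :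
    ∀ (p : Int), 0 < p →
      pvLoopB n target fuel p = p * pvRB target fuel (-(PySem.Int.floordiv (-n) p)) - n := by
  induction fuel with
  | zero => intro p hp; simp [pvLoopB, pvRB]; ring
  | succ fuel ih =>
      intro p hp
      rw [pvLoopB, pvRB, pv_dsum_eq]
      by_cases h : pvSumOfDigits (-(PySem.Int.floordiv (-n) p)) > target
      · rw [if_pos (by omega), if_neg (by omega)]
        rw [ih (p * 10) (by positivity), pv_ceil_comp n p hn hp]
        ring
      · rw [if_neg (by omega), if_pos (by omega)]
        ring

-- ===== the core invariant linking A's iterate a with B's ceiling c =====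

-- inv a c: a is c or c+1; in the latter case the ceiling's digit sum is still too big,
-- and a is a multiple of 10 unless its own digit sum is also too big.
def pvInv (target a c : Int) : Prop :=
  a = c ∨ (a = c + 1 ∧ target < pvSumOfDigits c ∧ (10 ∣ a ∨ target < pvSumOfDigits a))

theorem pv_inv_step (target a c : Int) (ha : 1 ≤ a) (hc : 0 ≤ c)
    (hinv : pvInv target a c) (hgo : target < pvSumOfDigits a) :
    pvInv target (a / 10 + 1) ((c + 9) / 10) := by
  rcases hinv with h | ⟨h, hSc, _⟩
  · subst h
    by_cases hr : a % 10 = 0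
    · -- a = 10q: a' = q+1, c' = q, and digit sums of q and 10q agree
      have hq : (a + 9) / 10 = a / 10 := by omega
      have h10 : 10 * (a / 10) = a := by omega
      have hSq := pvS_ten_mul (a / 10) (by omega)
      rw [h10] at hSq
      rw [hq]
      right
      refine ⟨rfl, by omega, ?_⟩
      by_cases h9 : (a / 10) % 10 = 9
      · left; omega
      · right
        rw [pvS_succ (a / 10) (by omega) h9]
        omega
    · left; omega
  · -- a = c + 1 and target < S c
    subst h
    by_cases hr : c % 10 = 9
    · -- c = 10m-1, a = 10m: a' = m+1, c' = m, S m = S a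
      have hq : (c + 9) / 10 = (c + 1) / 10 := by omega
      have ha' : (c + 1) / 10 + 1 = (c + 1) / 10 + 1 := rfl
      have h10 : 10 * ((c + 1) / 10) = c + 1 := by omega
      have hSm := pvS_ten_mul ((c + 1) / 10) (by omega)
      rw [h10] at hSm
      rw [hq]
      right
      refine ⟨rfl, by omega, ?_⟩
      by_cases h9 : ((c + 1) / 10) % 10 = 9
      · left; omega
      · right
        rw [pvS_succ ((c + 1) / 10) (by omega) h9]
        omega
    · by_cases hr0 : c % 10 = 0
      · -- c = 10q, a = 10q+1: a' = q+1, c' = q, S q = S c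
        have hq : (c + 9) / 10 = c / 10 := by omega
        have ha' : (c + 1) / 10 + 1 = c / 10 + 1 := by omega
        have h10 : 10 * (c / 10) = c := by omega
        have hSq := pvS_ten_mul (c / 10) (by omega)
        rw [h10] at hSq
        rw [hq, ha']
        right
        refine ⟨rfl, by omega, ?_⟩
        by_cases h9 : (c / 10) % 10 = 9
        · left; omega
        · right
          rw [pvS_succ (c / 10) (by omega) h9]
          omega
      · -- c % 10 ∈ 1..8: a' and c' coincide again
        left; omega

-- core: with enough fuel (A at most a steps), rA from a equals rB from c, one step behind
theorem pv_core (target : Int) (ht : 1 ≤ target) :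
    ∀ (fuel : Nat) (a c : Int), 1 ≤ a → 0 ≤ c → a.toNat ≤ fuel → pvInv target a c →
      pvRA target fuel a = pvRB target (fuel + 1) c := by
  intro fuel
  induction fuel with
  | zero => intro a c ha _ hf _; omega
  | succ fuel ih =>
      intro a c ha hc hf hinv
      rw [pvRA, pvRB]
      by_cases hstop : pvSumOfDigits a ≤ target
      · rw [if_pos hstop]
        rcases hinv with h | ⟨h, hSc, hd⟩
        · subst h; rw [if_pos hstop]
        · rw [if_neg (by omega)]
          -- a = c + 1, a a multiple of 10 (its digit sum is small), so c' = a/10 and stops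
          have h10 : (10 : Int) ∣ a := by
            rcases hd with h10 | hbig
            · exact h10
            · omega
          obtain ⟨m, hm⟩ := h10
          have hm1 : 1 ≤ m := by omega
          have hc' : (c + 9) / 10 = m := by omega
          have hSm : pvSumOfDigits m = pvSumOfDigits a := by
            rw [hm, pvS_ten_mul m (by omega)]
          rw [hc', pvRB]
          rcases fuel with _ | fuel
          · omega
          · rw [if_pos (by omega)]
            omega
      · rw [if_neg hstop]
        have hSc : target < pvSumOfDigits c := by
          rcases hinv with h | ⟨_, h, _⟩
          · subst h; omega
          · exact h
        rw [if_neg (by omega)]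
        have ha1 : a ≠ 1 := by
          intro h; rw [h, pvS_one] at hstop; omega
        have hstep := pv_inv_step target a c ha hc hinv (by omega)
        rw [ih (a / 10 + 1) ((c + 9) / 10) (by omega) (by omega) (by omega) hstep]

-- ===== VERDICT (by name: the statement is the Claim_ definition above) =====
theorem makeIntegerBeautiful_spec : Claim_equal_makeIntegerBeautiful := by
  intro n target _ hpre
  unfold Spec_makeIntegerBeautiful makeIntegerBeautiful makeIntegerBeautiful_alt
  rcases hpre with ⟨hn, ht⟩ | ⟨hn, ht⟩
  · rw [pv_loopA_eq, pv_loopB_eq n target (by omega) _ 1 (by norm_num)]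
    have hc1 : -(PySem.Int.floordiv (-n) 1) = n := by
      rw [PySem.Int.floordiv_eq_ediv_of_pos (by norm_num : (0:Int) < 1)]
      omega
    rw [hc1]
    have := pv_core target ht (n.toNat + 1) n n (by omega) (by omega) (by omega) (Or.inl rfl)
    rw [pow_zero]
    have hf : n.toNat + 1 + 1 = n.toNat + 2 := rfl
    rw [← hf, ← this]
    ring
  · subst hn
    show pvLoopA target 1 0 0 10 0 = pvLoopB 0 target 2 1
    have hS0 : pvSumOfDigits 0 = 0 := pvS_zero
    have hc0 : -(PySem.Int.floordiv (-(0:Int)) 1) = 0 := by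
      rw [PySem.Int.floordiv_eq_ediv_of_pos (by norm_num : (0:Int) < 1)]
      norm_num
    rw [pvLoopA, pvLoopB, pv_dsum_eq, hc0, hS0]
    rw [if_neg (by omega), if_neg (by omega)]
    norm_num
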